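-- pv_equiv track=rewrite | github.com/darlansousa/ra-ai-classifier | ai/openai/functions.py | filter_classification
-- ===== SOURCE A (Python) =====
-- def filter_classification(items, name) -> dict:
--     first = None
--     filtered = [item for item in items if item['name'] == name.lower()]
--     others = [item for item in items if item['name'] == 'outros']
--     if len(filtered) > 0:
--         first = filtered[0]
--     elif len(others) > 0:
--         first = others[0]
--
--     return first
-- ===== SOURCE B (Python) =====
-- def filter_classification(items, name) -> dict:
--     # Single pass with two tracked slots instead of building two filtered lists.
--     target = name.lower()
--     first_other = None
--     for item in items:
--         n = item['name']
--         if n == target: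
--             return item
--         elif n == 'outros' and first_other is None:
--             first_other = item
--     return first_other
-- ===== Notes on version B (the rewrite author's own statement) =====
-- stated objective: faster
-- what changed: Replaces A's two whole-list filtering comprehensions with a single short-circuiting loop that returns on the first name match and tracks the first 'outros' slot.
import Mathlib
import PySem

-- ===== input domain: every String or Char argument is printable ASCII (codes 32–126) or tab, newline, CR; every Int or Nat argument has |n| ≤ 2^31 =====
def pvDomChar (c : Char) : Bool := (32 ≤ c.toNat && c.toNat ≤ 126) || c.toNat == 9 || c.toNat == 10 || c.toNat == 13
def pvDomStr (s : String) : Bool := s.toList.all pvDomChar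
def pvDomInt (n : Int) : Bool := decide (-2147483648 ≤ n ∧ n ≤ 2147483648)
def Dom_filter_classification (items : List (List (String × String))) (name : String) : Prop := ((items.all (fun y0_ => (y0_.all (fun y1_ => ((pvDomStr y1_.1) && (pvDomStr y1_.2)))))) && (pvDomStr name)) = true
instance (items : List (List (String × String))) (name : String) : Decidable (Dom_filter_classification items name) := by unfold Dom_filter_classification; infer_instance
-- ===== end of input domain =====

-- B replaces A's two whole-list filtering passes by one short-circuiting loop with an
-- 'outros' slot; same return value wherever A returns.

-- ===== PORT A =====
def filter_classification (items : List (List (String × String))) (name : String) : Option (List (String × String)) :=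
  -- filtered = [item for item in items if item['name'] == name.lower()]
  let filtered := items.filter (fun item => PySem.Dict.get? (PySem.Dict.mk item) "name" == some (PySem.Str.lower name))
  -- others = [item for item in items if item['name'] == 'outros']
  let others := items.filter (fun item => PySem.Dict.get? (PySem.Dict.mk item) "name" == some "outros")
  if filtered.length > 0 then filtered.head?
  else if others.length > 0 then others.head?
  else none

-- ===== PORT B =====
-- the for-loop of Source B: early return on a name match, else track the first 'outros'
def fcLoop (target : String) (items : List (List (String × String))) (firstOther : Option (List (String × String))) : Option (List (String × String)) :=
  match items with
  | [] => firstOther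
  | item :: rest =>
      let n := PySem.Dict.get? (PySem.Dict.mk item) "name"
      if n == some target then some item
      else if n == some "outros" && firstOther.isNone then fcLoop target rest (some item)
      else fcLoop target rest firstOther

def filter_classification_alt (items : List (List (String × String))) (name : String) : Option (List (String × String)) :=
  fcLoop (PySem.Str.lower name) items none

-- ===== PRECONDITION & SPEC =====
-- A (and B) raise KeyError when some item lacks the 'name' key, so those inputs are excluded;
-- duplicate keys inside an item are excluded because such a list does not represent a Python dict.
def Pre_filter_classification (items : List (List (String × String))) (name : String) : Prop :=
  ∀ item ∈ items, (PySem.Dict.get? (PySem.Dict.mk item) "name").isSome = true ∧ (item.map Prod.fst).Nodup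
instance (items : List (List (String × String))) (name : String) : Decidable (Pre_filter_classification items name) := by unfold Pre_filter_classification; infer_instance

def pvWitness_filter_classification : (List (List (String × String))) × String :=
  ([[("name", "outros")], [("name", "abc"), ("score", "2")]], "Abc")

def Spec_filter_classification (items : List (List (String × String))) (name : String) (out : Option (List (String × String))) : Prop := out = filter_classification_alt items name
instance (items : List (List (String × String))) (name : String) (out : Option (List (String × String))) : Decidable (Spec_filter_classification items name out) := by unfold Spec_filter_classification; infer_instance

-- ===== CLAIM (what is proved, stated in full; the proofs are below) =====
def Claim_equal_filter_classification : Prop := ∀ (items : List (List (String × String))) (name : String), Dom_filter_classification items name → Pre_filter_classification items name → Spec_filter_classification items name (filter_classification items name)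

-- ===== LEMMAS AND PROOFS =====

-- what the loop of B computes, for any current value of the 'outros' slot
theorem fcLoop_eq (target : String) (items : List (List (String × String)))
    (fo : Option (List (String × String))) :
    fcLoop target items fo =
      match items.filter (fun item => PySem.Dict.get? (PySem.Dict.mk item) "name" == some target) with
      | x :: _ => some x
      | [] =>
          match fo with
          | some o => some o
          | none => (items.filter (fun item => PySem.Dict.get? (PySem.Dict.mk item) "name" == some "outros")).head? := by
  induction items generalizing fo with
  | nil => cases fo <;> simp [fcLoop]
  | cons item rest ih =>
      by_cases hp : (PySem.Dict.get? (PySem.Dict.mk item) "name" == some target) = true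
      · simp [fcLoop, hp, List.filter_cons]
      · by_cases hq : (PySem.Dict.get? (PySem.Dict.mk item) "name" == some "outros") = true
        · cases fo with
          | none => simp [fcLoop, hp, hq, List.filter_cons, ih]
          | some o => simp [fcLoop, hp, hq, List.filter_cons, ih]
        · simp [fcLoop, hp, hq, List.filter_cons, ih]

-- ===== VERDICT (by name: the statement is the Claim_ definition above) =====
theorem filter_classification_spec : Claim_equal_filter_classification := by
  intro items name _ _
  unfold Spec_filter_classification filter_classification filter_classification_alt
  rw [fcLoop_eq]
  cases hf : items.filter (fun item => PySem.Dict.get? (PySem.Dict.mk item) "name" == some (PySem.Str.lower name)) with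
  | cons x xs => simp [hf]
  | nil =>
      simp only [hf]
      cases ho : items.filter (fun item => PySem.Dict.get? (PySem.Dict.mk item) "name" == some "outros") with
      | nil => simp [ho]
      | cons y ys => simp [ho]
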